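-- pv_equiv track=rewrite | github.com/miliar/Code_Jam_Webscraper | solutions_python/solutions_year15_round0_nr1/2034.py | solve
-- ===== SOURCE A (Python) =====
-- def solve(Smax, histo):
-- 	standing = 0
-- 	friends = 0
--
-- 	for i in range(0, int(Smax)+1):
-- 		if standing < i :
-- 			friends += 1
-- 			standing += 1;
--
-- 		standing += int(histo[i])
-- 	return friends
-- ===== SOURCE B (Python) =====
-- def solve(Smax, histo):
--     # two passes: materialise the deficit list i - (audience seen so far),
--     # then count friends by an independent fold over the deficits
--     deficits = []
--     seen = 0
--     for i in range(0, int(Smax) + 1):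
--         deficits.append(i - seen)
--         seen += int(histo[i])
--     friends = 0
--     for d in deficits:
--         if friends < d:
--             friends += 1
--     return friends
-- ===== Notes on version B (the rewrite author's own statement) =====
-- stated objective: alternative
-- what changed: B splits A's single loop with the mixed 'standing' accumulator (prefix sum plus friends) into a pure prefix-sum pass that materialises the deficit list i - seen and a second independent fold over the deficits that ratchets the friend count, so the friend logic never touches histo or a running sum.
import Mathlib
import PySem

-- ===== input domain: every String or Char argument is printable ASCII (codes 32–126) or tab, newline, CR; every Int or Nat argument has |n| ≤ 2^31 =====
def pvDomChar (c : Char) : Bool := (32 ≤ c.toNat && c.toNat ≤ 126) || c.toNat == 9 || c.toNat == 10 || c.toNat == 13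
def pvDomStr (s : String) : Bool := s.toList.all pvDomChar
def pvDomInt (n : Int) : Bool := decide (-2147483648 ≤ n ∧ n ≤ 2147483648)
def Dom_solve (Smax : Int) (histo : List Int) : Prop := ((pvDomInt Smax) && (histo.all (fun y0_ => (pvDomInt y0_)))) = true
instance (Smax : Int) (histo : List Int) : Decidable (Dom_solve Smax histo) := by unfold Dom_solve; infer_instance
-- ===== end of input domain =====

-- B replaces A's single loop over a mixed 'standing' accumulator by a pure prefix-deficit pass
-- followed by an independent ratchet fold over the deficits (objective: alternative decomposition).


-- ===== PORT A =====
-- one loop; state (standing, friends); 'if standing < i: friends += 1; standing += 1' then 'standing += histo[i]'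
def solveStepA (histo : List Int) (st : Int × Int) (i : Int) : Int × Int :=
  let p := if st.1 < i then (st.1 + 1, st.2 + 1) else st
  (p.1 + PySem.List.pyGetD histo i 0, p.2)

def solve (Smax : Int) (histo : List Int) : Int :=
  ((PySem.List.pyRange 0 (Smax + 1) 1).foldl (solveStepA histo) (0, 0)).2

-- ===== PORT B =====
-- pass 1: build the deficit list i - seen while summing histo; pass 2: ratchet friends over the deficits
def solveDeficitStep (histo : List Int) (st : List Int × Int) (i : Int) : List Int × Int :=
  (st.1 ++ [i - st.2], st.2 + PySem.List.pyGetD histo i 0)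

def solveFriendStep (friends d : Int) : Int :=
  if friends < d then friends + 1 else friends

def solve_alt (Smax : Int) (histo : List Int) : Int :=
  let deficits := ((PySem.List.pyRange 0 (Smax + 1) 1).foldl (solveDeficitStep histo) ([], 0)).1
  deficits.foldl solveFriendStep 0

-- ===== PRECONDITION & SPEC =====
-- Pre_ excludes exactly the inputs where Python A raises IndexError: 0 ≤ Smax with histo shorter than Smax+1.
def Pre_solve (Smax : Int) (histo : List Int) : Prop := Smax < (histo.length : Int)
instance (Smax : Int) (histo : List Int) : Decidable (Pre_solve Smax histo) := by unfold Pre_solve; infer_instance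
def pvWitness_solve : Int × List Int := (2, [1, 0, 1])

def Spec_solve (Smax : Int) (histo : List Int) (out : Int) : Prop := out = solve_alt Smax histo
instance (Smax : Int) (histo : List Int) (out : Int) : Decidable (Spec_solve Smax histo out) := by unfold Spec_solve; infer_instance

-- ===== CLAIM (what is proved, stated in full; the proofs are below) =====
def Claim_equal_solve : Prop := ∀ (Smax : Int) (histo : List Int), Dom_solve Smax histo → Pre_solve Smax histo → Spec_solve Smax histo (solve Smax histo)

-- ===== LEMMAS AND PROOFS =====

-- B's builder fold decomposes: the list component is accumulated by append.
theorem solveDeficit_prefix (histo : List Int) (l : List Int) (acc : List Int) (S : Int) :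
    l.foldl (solveDeficitStep histo) (acc, S)
      = (acc ++ (l.foldl (solveDeficitStep histo) ([], S)).1,
         (l.foldl (solveDeficitStep histo) ([], S)).2) := by
  induction l generalizing acc S with
  | nil => simp
  | cons i t ih =>
    simp only [List.foldl_cons, solveDeficitStep]
    rw [ih (acc ++ [i - S]) (S + PySem.List.pyGetD histo i 0),
        ih ([] ++ [i - S]) (S + PySem.List.pyGetD histo i 0)]
    simp

-- Main invariant: A's fold from standing = S + f, friends = f gives the same friends as
-- B's ratchet fold (from f) over the deficits built from running sum S.
theorem solve_invariant (histo : List Int) (l : List Int) (S f : Int) :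
    (l.foldl (solveStepA histo) (S + f, f)).2
      = ((l.foldl (solveDeficitStep histo) ([], S)).1).foldl solveFriendStep f := by
  induction l generalizing S f with
  | nil => simp
  | cons i t ih =>
    simp only [List.foldl_cons]
    have hstep : solveDeficitStep histo ([], S) i = ([i - S], S + PySem.List.pyGetD histo i 0) := by
      simp [solveDeficitStep]
    rw [hstep, solveDeficit_prefix histo t [i - S] (S + PySem.List.pyGetD histo i 0)]
    simp only [List.singleton_append, List.foldl_cons]
    by_cases h : f < i - S
    · have hA : solveStepA histo (S + f, f) i
          = ((S + PySem.List.pyGetD histo i 0) + (f + 1), f + 1) := by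
        simp only [solveStepA]
        rw [if_pos (by omega)]
        ring_nf
      have hB : solveFriendStep f (i - S) = f + 1 := by
        simp [solveFriendStep, h]
      rw [hA, hB, ih]
    · have hA : solveStepA histo (S + f, f) i
          = ((S + PySem.List.pyGetD histo i 0) + f, f) := by
        simp only [solveStepA]
        rw [if_neg (by omega)]
        ring_nf
      have hB : solveFriendStep f (i - S) = f := by
        simp [solveFriendStep, h]
      rw [hA, hB, ih]

-- ===== VERDICT (by name: the statement is the Claim_ definition above) =====
theorem solve_spec : Claim_equal_solve := by
  intro Smax histo _ _
  show solve Smax histo = solve_alt Smax histo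
  unfold solve solve_alt
  have := solve_invariant histo (PySem.List.pyRange 0 (Smax + 1) 1) 0 0
  simpa using this
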